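-- pv_equiv track=rewrite | github.com/mediwind/PS_Algorithm | 백준/Silver/8808. Malowane liczby/Malowane liczby.py | color_of_fraction
-- ===== SOURCE A (Python) =====
-- def color_of_fraction(a, b):
--     s = 0
--     while b:
--         s += a // b
--         a, b = b, a % b
--
--     if s % 2 == 1:
--         return "czerwony"
--     else:
--         return "niebieski"
-- ===== SOURCE B (Python) =====
-- def color_of_fraction(a, b):
--     # Recurse on the Euclidean step directly over the COLOR: the base case is
--     # blue, and each odd continued-fraction quotient flips the color of the tail.
--     if b == 0:
--         return "niebieski"
--     tail = color_of_fraction(b, a % b)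
--     if a // b % 2 == 1:
--         return "czerwony" if tail == "niebieski" else "niebieski"
--     return tail
-- ===== Notes on version B (the rewrite author's own statement) =====
-- stated objective: alternative
-- what changed: Replaces A's while-loop summing all quotients into an integer accumulator and taking its parity at the end by a direct recursion over the colors themselves: the b==0 base case is blue and each odd Euclidean quotient flips the recursively computed color, so no sum is ever formed.
import Mathlib
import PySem

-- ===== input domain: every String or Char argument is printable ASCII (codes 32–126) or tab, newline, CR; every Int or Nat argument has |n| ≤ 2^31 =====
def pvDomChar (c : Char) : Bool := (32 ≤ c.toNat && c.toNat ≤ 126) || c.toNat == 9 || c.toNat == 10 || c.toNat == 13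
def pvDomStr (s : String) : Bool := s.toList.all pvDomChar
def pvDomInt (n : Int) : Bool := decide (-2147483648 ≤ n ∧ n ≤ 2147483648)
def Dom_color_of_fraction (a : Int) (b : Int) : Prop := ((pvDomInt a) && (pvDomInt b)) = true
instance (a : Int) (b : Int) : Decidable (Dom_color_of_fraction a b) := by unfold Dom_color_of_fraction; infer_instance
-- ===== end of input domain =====

-- B replaces A's quotient-summing while loop by a direct recursion on the color itself:
-- base case blue, each odd Euclidean quotient flips the tail's color (alternative decomposition, same cost).

-- Termination fact used by both ports: Python's a % b shrinks |b| when b ≠ 0.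
theorem pvModNatAbsLt (a b : Int) (hb : b ≠ 0) : (PySem.Int.mod a b).natAbs < b.natAbs := by
  rcases lt_or_gt_of_ne hb with h | h
  · have := PySem.Int.mod_neg_bounds (a := a) h
    omega
  · have h1 := PySem.Int.mod_nonneg (a := a) h
    have h2 := PySem.Int.mod_lt (a := a) h
    omega

-- ===== PORT A =====
-- the while-loop of A, state (a, b, s)
def colorLoopA (a b s : Int) : Int :=
  if hb : b = 0 then s
  else colorLoopA b (PySem.Int.mod a b) (s + PySem.Int.floordiv a b)
termination_by b.natAbs
decreasing_by exact pvModNatAbsLt a b hb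

def color_of_fraction (a : Int) (b : Int) : String :=
  let s := colorLoopA a b 0
  if PySem.Int.mod s 2 = 1 then "czerwony" else "niebieski"

-- ===== PORT B =====
def color_of_fraction_alt (a : Int) (b : Int) : String :=
  if hb : b = 0 then "niebieski"
  else
    let tail := color_of_fraction_alt b (PySem.Int.mod a b)
    if PySem.Int.mod (PySem.Int.floordiv a b) 2 = 1 then
      if tail = "niebieski" then "czerwony" else "niebieski"
    else tail
termination_by b.natAbs
decreasing_by exact pvModNatAbsLt a b hb

-- ===== PRECONDITION & SPEC =====
def Spec_color_of_fraction (a : Int) (b : Int) (out : String) : Prop := out = color_of_fraction_alt a b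
instance (a : Int) (b : Int) (out : String) : Decidable (Spec_color_of_fraction a b out) := by unfold Spec_color_of_fraction; infer_instance

-- ===== CLAIM (what is proved, stated in full; the proofs are below) =====
def Claim_equal_color_of_fraction : Prop := ∀ (a : Int) (b : Int), Dom_color_of_fraction a b → Spec_color_of_fraction a b (color_of_fraction a b)

-- ===== LEMMAS AND PROOFS =====
-- Unfolded step equations of A's loop.
theorem colorLoopA_zero (a s : Int) : colorLoopA a 0 s = s := by
  rw [colorLoopA]
  simp

theorem colorLoopA_step (a b s : Int) (hb : b ≠ 0) :
    colorLoopA a b s = colorLoopA b (PySem.Int.mod a b) (s + PySem.Int.floordiv a b) := by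
  rw [colorLoopA]
  simp [hb]

-- Shifting A's accumulator out of the loop.
theorem colorLoopA_shift (a b s : Int) : colorLoopA a b s = s + colorLoopA a b 0 := by
  by_cases hb : b = 0
  · subst hb
    rw [colorLoopA_zero, colorLoopA_zero]
    ring
  · rw [colorLoopA_step a b s hb, colorLoopA_step a b 0 hb,
        colorLoopA_shift b (PySem.Int.mod a b) (s + PySem.Int.floordiv a b),
        colorLoopA_shift b (PySem.Int.mod a b) (0 + PySem.Int.floordiv a b)]
    ring
termination_by b.natAbs
decreasing_by all_goals exact pvModNatAbsLt a b hb

-- Python's % with divisor 2 is Lean's emod (both nonnegative).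
theorem pvMod_two (x : Int) : PySem.Int.mod x 2 = x % 2 :=
  PySem.Int.mod_eq_emod_of_pos (by norm_num)

-- B's color recursion computes the parity of A's quotient sum.
theorem alt_eq_parity (a b : Int) :
    color_of_fraction_alt a b =
      (if PySem.Int.mod (colorLoopA a b 0) 2 = 1 then "czerwony" else "niebieski") := by
  by_cases hb : b = 0
  · subst hb
    rw [color_of_fraction_alt, colorLoopA_zero]
    simp [PySem.Int.mod]
  · rw [color_of_fraction_alt]
    simp only [dif_neg hb]
    rw [colorLoopA_step a b 0 hb,
        colorLoopA_shift b (PySem.Int.mod a b) (0 + PySem.Int.floordiv a b),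
        alt_eq_parity b (PySem.Int.mod a b),
        pvMod_two, pvMod_two, pvMod_two]
    rcases Int.emod_two_eq (PySem.Int.floordiv a b) with hq | hq <;>
      rcases Int.emod_two_eq (colorLoopA b (PySem.Int.mod a b) 0) with hr | hr <;>
      (simp [hq, hr]; omega)
termination_by b.natAbs
decreasing_by exact pvModNatAbsLt a b hb

-- ===== VERDICT (by name: the statement is the Claim_ definition above) =====
theorem color_of_fraction_spec : Claim_equal_color_of_fraction := by
  intro a b _
  unfold Spec_color_of_fraction color_of_fraction
  rw [alt_eq_parity]
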